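-- pv_equiv track=rewrite | github.com/yewennuan/myPythonStart | flask-principal-demo/demo-run-1.py | check_permission
-- ===== SOURCE A (Python) =====
-- user_role_dict = {1: {2, }}
--
-- user_permission_dict = {
--     1: {"delete", },
--     2: {"get", },
--     3: {"get", "update"}
-- }
--
-- role_permission_dict = {
--     1: {"add", "update", "delete", "get"},
--     2: {"get", "update"},
--     3: {"get", "update", "delete"}
-- }
--
-- def check_permission(permissions, logic, user_id):
--     if not permissions:
--         return True
--     if isinstance(permissions, str):
--         permissions = {permissions, }
--     user_permissions = user_permission_dict.get(user_id, set())
--     user_role_ids = user_role_dict.get(user_id, set())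
--     user_role_permissions = set()
--     for user_role_id in user_role_ids:
--         role_permission = role_permission_dict.get(user_role_id, set())
--         user_role_permissions = user_role_permissions.union(role_permission)
--     user_all_permissions = user_permissions.union(user_role_permissions)
--     if logic == "AND":
--         return True if permissions.issubset(user_all_permissions) else False
--     elif logic == "OR":
--         return True if permissions.intersection(user_all_permissions) else False
-- ===== SOURCE B (Python) =====
-- user_role_dict = {1: {2, }}
--
-- user_permission_dict = {
--     1: {"delete", },
--     2: {"get", },
--     3: {"get", "update"}
-- }
--
-- role_permission_dict = {
--     1: {"add", "update", "delete", "get"},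
--     2: {"get", "update"},
--     3: {"get", "update", "delete"}
-- }
--
-- def check_permission(permissions, logic, user_id):
--     if not permissions:
--         return True
--     if isinstance(permissions, str):
--         permissions = {permissions, }
--     own = user_permission_dict.get(user_id, set())
--     roles = user_role_dict.get(user_id, set())
--     all_ok = True
--     any_ok = False
--     for p in permissions:
--         ok = p in own
--         if not ok:
--             for r in roles:
--                 if p in role_permission_dict.get(r, set()):
--                     ok = True
--                     break
--         all_ok = all_ok and ok
--         any_ok = any_ok or ok
--     if logic == "AND":
--         return all_ok
--     if logic == "OR":
--         return any_ok
-- ===== Notes on version B (the rewrite author's own statement) =====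
-- stated objective: alternative
-- what changed: B never materializes the combined permission set: a single forward scan over the required permissions checks each one against the user's own set and, failing that, the user's roles' sets, accumulating an (all_ok, any_ok) pair from which the AND/OR answer is read off.
import Mathlib
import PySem

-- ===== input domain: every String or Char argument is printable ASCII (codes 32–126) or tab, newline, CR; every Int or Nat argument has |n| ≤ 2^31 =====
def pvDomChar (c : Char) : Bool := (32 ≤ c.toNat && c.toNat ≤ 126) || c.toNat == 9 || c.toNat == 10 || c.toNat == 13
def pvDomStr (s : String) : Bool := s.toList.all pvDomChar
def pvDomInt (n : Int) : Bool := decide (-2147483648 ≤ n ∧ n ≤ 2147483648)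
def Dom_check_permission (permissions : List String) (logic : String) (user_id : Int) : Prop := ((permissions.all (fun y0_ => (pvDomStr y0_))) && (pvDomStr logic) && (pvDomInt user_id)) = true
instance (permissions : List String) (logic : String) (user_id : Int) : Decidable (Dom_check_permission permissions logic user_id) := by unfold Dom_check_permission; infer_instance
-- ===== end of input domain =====

-- B replaces A's union-then-subset/intersection with one forward scan over the required
-- permissions accumulating an (all_ok, any_ok) pair: alternative decomposition, same cost.


-- ===== PORT A =====
-- A builds the union of the user's own permissions with all of their roles' permission
-- sets, then checks subset (AND) / non-empty intersection (OR); other logic values -> none.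
def pvUserRoleDict : PySem.Dict Int (PySem.Set Int) := PySem.Dict.ofList [(1, [2])]
def pvUserPermDict : PySem.Dict Int (PySem.Set String) :=
  PySem.Dict.ofList [(1, ["delete"]), (2, ["get"]), (3, ["get", "update"])]
def pvRolePermDict : PySem.Dict Int (PySem.Set String) :=
  PySem.Dict.ofList [(1, ["add", "update", "delete", "get"]), (2, ["get", "update"]), (3, ["get", "update", "delete"])]

def check_permission (permissions : List String) (logic : String) (user_id : Int) : Option Bool :=
  if permissions.isEmpty then some true else
  let user_permissions := pvUserPermDict.getD user_id []
  let user_role_ids := pvUserRoleDict.getD user_id []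
  let user_role_permissions :=
    user_role_ids.foldl
      (fun acc r => PySem.Set.union acc (pvRolePermDict.getD r [])) ([] : PySem.Set String)
  let user_all_permissions := PySem.Set.union user_permissions user_role_permissions
  if logic = "AND" then some (PySem.Set.issubset permissions user_all_permissions)
  else if logic = "OR" then some (!(PySem.Set.inter permissions user_all_permissions).isEmpty)
  else none

-- ===== PORT B =====
-- inner loop: `for r in roles: if p in role_permission_dict.get(r, set()): ok = True; break`
def pvRoleGrant (p : String) : List Int → Bool
  | [] => false
  | r :: rs => if (pvRolePermDict.getD r []).contains p then true else pvRoleGrant p rs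

-- outer loop: one scan accumulating (all_ok, any_ok)
def pvScan (own : PySem.Set String) (roles : List Int) :
    List String → Bool → Bool → Bool × Bool
  | [], all_ok, any_ok => (all_ok, any_ok)
  | p :: ps, all_ok, any_ok =>
    let ok := if own.contains p then true else pvRoleGrant p roles
    pvScan own roles ps (all_ok && ok) (any_ok || ok)

def check_permission_alt (permissions : List String) (logic : String) (user_id : Int) : Option Bool :=
  if permissions.isEmpty then some true else
  let own := pvUserPermDict.getD user_id []
  let roles := pvUserRoleDict.getD user_id []
  let res := pvScan own roles permissions true false
  if logic = "AND" then some res.1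
  else if logic = "OR" then some res.2
  else none

-- ===== PRECONDITION & SPEC =====
def Spec_check_permission (permissions : List String) (logic : String) (user_id : Int) (out : Option Bool) : Prop := out = check_permission_alt permissions logic user_id
instance (permissions : List String) (logic : String) (user_id : Int) (out : Option Bool) : Decidable (Spec_check_permission permissions logic user_id out) := by unfold Spec_check_permission; infer_instance

-- ===== CLAIM (what is proved, stated in full; the proofs are below) =====
def Claim_equal_check_permission : Prop := ∀ (permissions : List String) (logic : String) (user_id : Int), Dom_check_permission permissions logic user_id → Spec_check_permission permissions logic user_id (check_permission permissions logic user_id)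

-- ===== LEMMAS AND PROOFS =====

theorem pv_roleGrant_eq (p : String) (roles : List Int) :
    pvRoleGrant p roles = roles.any (fun r => (pvRolePermDict.getD r []).contains p) := by
  induction roles with
  | nil => rfl
  | cons r rs ih => by_cases h : (pvRolePermDict.getD r []).contains p <;>
      simp [pvRoleGrant, ih]

theorem pv_scan_eq (own : PySem.Set String) (roles : List Int) (ps : List String)
    (a b : Bool) :
    pvScan own roles ps a b =
      (a && ps.all (fun p => own.contains p || pvRoleGrant p roles),
       b || ps.any (fun p => own.contains p || pvRoleGrant p roles)) := by
  induction ps generalizing a b with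
  | nil => simp [pvScan]
  | cons p ps ih =>
    simp only [pvScan, ih, List.all_cons, List.any_cons]
    by_cases h : own.contains p <;> simp [Bool.and_assoc, Bool.or_assoc]

-- membership in the folded union of role permission sets = some role grants it
theorem pv_mem_fold_union (p : String) (rids : List Int) (acc : PySem.Set String) :
    p ∈ rids.foldl (fun acc r => PySem.Set.union acc (pvRolePermDict.getD r [])) acc ↔
      p ∈ acc ∨ ∃ r ∈ rids, p ∈ pvRolePermDict.getD r [] := by
  induction rids generalizing acc with
  | nil => simp
  | cons r rs ih =>
    simp [List.foldl_cons, ih, PySem.Set.mem_union]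
    tauto

theorem pv_granted (p : String) (user_id : Int) :
    (p ∈ PySem.Set.union (pvUserPermDict.getD user_id [])
        ((pvUserRoleDict.getD user_id []).foldl
          (fun acc r => PySem.Set.union acc (pvRolePermDict.getD r [])) ([] : PySem.Set String))) ↔
      ((pvUserPermDict.getD user_id []).contains p ||
        pvRoleGrant p (pvUserRoleDict.getD user_id [])) = true := by
  simp [PySem.Set.mem_union, pv_mem_fold_union, pv_roleGrant_eq, List.any_eq_true]

-- ===== VERDICT (by name: the statement is the Claim_ definition above) =====
theorem check_permission_spec : Claim_equal_check_permission := by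
  intro permissions logic user_id _
  unfold Spec_check_permission check_permission check_permission_alt
  by_cases he : permissions.isEmpty
  · simp [he]
  · simp only [he, pv_scan_eq, Bool.true_and, Bool.false_or]
    by_cases hA : logic = "AND"
    · simp only [hA, if_true]
      refine congrArg some ?_
      rw [Bool.eq_iff_iff, PySem.Set.issubset_iff, List.all_eq_true]
      exact forall_congr' fun p => imp_congr_right fun _ => pv_granted p user_id
    · by_cases hO : logic = "OR"
      · simp only [hO, if_true]
        refine congrArg some ?_
        rw [Bool.eq_iff_iff]
        simp only [Bool.not_eq_true', List.isEmpty_eq_false_iff, ne_eq, ← List.length_pos_iff,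
          List.length_pos_iff_exists_mem, List.any_eq_true]
        constructor
        · rintro ⟨x, hx⟩
          have h := (PySem.Set.mem_inter _ _ _).1 hx
          exact ⟨x, h.1, (pv_granted x user_id).1 h.2⟩
        · rintro ⟨x, hx, hg⟩
          exact ⟨x, (PySem.Set.mem_inter _ _ _).2 ⟨hx, (pv_granted x user_id).2 hg⟩⟩
      · simp [hA, hO]
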